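-- pv_equiv track=rewrite | github.com/junhg0211/liskadia | lyskad/util.py | is_attacking
-- ===== SOURCE A (Python) =====
-- def get_color_generator(start_pos: tuple[int, int], direction: int, position_nemas: dict[tuple[int, int], str]):
--     if direction == 0:  # UP
--         dx = 0
--         dy = -1
--     elif direction == 1:  # LEFT
--         dx = -1
--         dy = 0
--     elif direction == 2:  # DOWN
--         dx = 0
--         dy = 1
--     else:  # LEFT
--         dx = 1
--         dy = 0
--
--     x, y = start_pos
--     horizontal_direction = bool(direction % 2)
--     now_nema_vertical = bool((x + y) % 2)
--     while True:
--         now_color = position_nemas.get((x, y))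
--
--         if now_color is None:
--             return
--
--         hostile = horizontal_direction == now_nema_vertical
--         yield now_color, hostile
--
--         x += dx
--         y += dy
--         now_nema_vertical = not now_nema_vertical
--
-- def is_attacking(direction: int, position: tuple[int, int], position_nemas: dict[tuple[int, int], str]) -> int:
--     anchor_color = ''
--     defence = None
--     for i, (now_color, hostile) in enumerate(get_color_generator(position, direction, position_nemas)):
--         if i == 0:
--             anchor_color = now_color
--             continue
--         if hostile:
--             if now_color == defence:
--                 continue
--             if now_color == anchor_color:
--                 return i
--             break
--         else:
--             if defence is None:
--                 defence = now_color
--             if defence != now_color: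
--                 break
--             continue
--     return 0
-- ===== SOURCE B (Python) =====
-- def is_attacking(direction: int, position: tuple[int, int], position_nemas: dict[tuple[int, int], str]) -> int:
--     dx, dy = {0: (0, -1), 1: (-1, 0), 2: (0, 1)}.get(direction, (1, 0))
--     x, y = position
--     colors = []
--     while (x, y) in position_nemas:
--         colors.append(position_nemas[(x, y)])
--         x += dx
--         y += dy
--     if len(colors) < 2:
--         return 0
--     anchor = colors[0]
--     if (direction % 2 == 1) == ((position[0] + position[1] + 1) % 2 == 1):
--         # cell 1 is hostile: it decides immediately
--         return 1 if colors[1] == anchor else 0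
--     defence = colors[1]
--     for i in range(2, len(colors)):
--         c = colors[i]
--         if c == defence:
--             continue
--         return i if i % 2 == 0 and c == anchor else 0
--     return 0
-- ===== Notes on version B (the rewrite author's own statement) =====
-- stated objective: simpler
-- what changed: B replaces A's generator/consumer pair and its per-step state machine (toggling parity flag, mutable defence, break/continue cases) by: materialise the ray of colors with one while loop, decide the hostile parity of cell 1 arithmetically, answer directly from colors[1] when cell 1 is hostile, and otherwise return the index of the first color deviating from the defence color iff it is even and matches the anchor.
import Mathlib
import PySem

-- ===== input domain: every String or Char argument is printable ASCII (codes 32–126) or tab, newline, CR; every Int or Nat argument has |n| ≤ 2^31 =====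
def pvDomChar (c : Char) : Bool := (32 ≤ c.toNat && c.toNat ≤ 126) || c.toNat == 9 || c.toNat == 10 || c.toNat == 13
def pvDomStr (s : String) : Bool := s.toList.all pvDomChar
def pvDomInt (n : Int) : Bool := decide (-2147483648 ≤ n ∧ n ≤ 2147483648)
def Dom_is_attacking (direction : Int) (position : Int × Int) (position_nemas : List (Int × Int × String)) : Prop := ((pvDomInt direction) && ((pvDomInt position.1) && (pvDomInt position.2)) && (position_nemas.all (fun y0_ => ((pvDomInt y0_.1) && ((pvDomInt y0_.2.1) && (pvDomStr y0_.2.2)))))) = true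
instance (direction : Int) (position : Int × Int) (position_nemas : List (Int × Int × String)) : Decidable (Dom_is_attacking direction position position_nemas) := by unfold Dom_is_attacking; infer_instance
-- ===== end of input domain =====

-- B collapses A's generator/consumer pair into: materialise the ray of colors, decide the
-- hostile parity arithmetically, and scan for the first color deviating from the defence
-- color (objective: simpler).  The fuel 'position_nemas.length + 1' in both walkers is only
-- a totality device: the walk moves strictly in one coordinate, so it meets a missing key
-- within dict-size + 1 steps and the fuel-exhaustion branch is unreachable.

-- ===== PORT A =====
-- generator get_color_generator: yields (color, hostile) while the cell is present
def pvGen (d : PySem.Dict (Int × Int) String) (x y dx dy : Int) (hd nv : Bool) : Nat → List (String × Bool)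
  | 0 => []
  | f + 1 =>
    match d.get? (x, y) with
    | none => []
    | some c => (c, hd == nv) :: pvGen d (x + dx) (y + dy) dx dy hd (!nv) f

-- the for-loop of A over enumerate(generator), with its early returns/breaks
def pvConsume (anchor : String) (defence : Option String) (i : Int) : List (String × Bool) → Int
  | [] => 0
  | (c, h) :: rest =>
    if i = 0 then pvConsume c defence (i + 1) rest
    else if h then
      if defence == some c then pvConsume anchor defence (i + 1) rest
      else if c == anchor then i
      else 0
    else
      let defence' := if defence.isNone then some c else defence
      if defence' ≠ some c then 0 else pvConsume anchor defence' (i + 1) rest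

def is_attacking (direction : Int) (position : Int × Int) (position_nemas : List (Int × Int × String)) : Int :=
  let d := PySem.Dict.ofList (position_nemas.map (fun t => ((t.1, t.2.1), t.2.2)))
  let dxy : Int × Int :=
    if direction = 0 then (0, -1)
    else if direction = 1 then (-1, 0)
    else if direction = 2 then (0, 1)
    else (1, 0)
  let hd := PySem.Int.mod direction 2 == 1
  let nv := PySem.Int.mod (position.1 + position.2) 2 == 1
  pvConsume "" none 0 (pvGen d position.1 position.2 dxy.1 dxy.2 hd nv (position_nemas.length + 1))

-- ===== PORT B =====
-- collect the colors along the ray (B's while loop)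
def pvRay (d : PySem.Dict (Int × Int) String) (x y dx dy : Int) : Nat → List String
  | 0 => []
  | f + 1 =>
    match d.get? (x, y) with
    | none => []
    | some c => c :: pvRay d (x + dx) (y + dy) dx dy f

-- B's for-loop over range(2, len(colors)): first color ≠ defence decides
def pvFindDev (anchor defc : String) : List String → Int → Int
  | [], _ => 0
  | c :: rest, i =>
    if c == defc then pvFindDev anchor defc rest (i + 1)
    else if PySem.Int.mod i 2 == 0 && c == anchor then i else 0

def is_attacking_alt (direction : Int) (position : Int × Int) (position_nemas : List (Int × Int × String)) : Int :=
  let d := PySem.Dict.ofList (position_nemas.map (fun t => ((t.1, t.2.1), t.2.2)))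
  let dxy := (PySem.Dict.mk [((0 : Int), ((0 : Int), (-1 : Int))), (1, (-1, 0)), (2, (0, 1))]).getD direction (1, 0)
  let colors := pvRay d position.1 position.2 dxy.1 dxy.2 (position_nemas.length + 1)
  match colors with
  | [] => 0
  | [_] => 0
  | c0 :: c1 :: rest =>
    if (PySem.Int.mod direction 2 == 1) == (PySem.Int.mod (position.1 + position.2 + 1) 2 == 1) then
      if c1 == c0 then 1 else 0
    else
      pvFindDev c0 c1 rest 2

-- ===== PRECONDITION & SPEC =====
def Spec_is_attacking (direction : Int) (position : Int × Int) (position_nemas : List (Int × Int × String)) (out : Int) : Prop := out = is_attacking_alt direction position position_nemas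
instance (direction : Int) (position : Int × Int) (position_nemas : List (Int × Int × String)) (out : Int) : Decidable (Spec_is_attacking direction position position_nemas out) := by unfold Spec_is_attacking; infer_instance

-- ===== CLAIM (what is proved, stated in full; the proofs are below) =====
def Claim_equal_is_attacking : Prop := ∀ (direction : Int) (position : Int × Int) (position_nemas : List (Int × Int × String)), Dom_is_attacking direction position position_nemas → Spec_is_attacking direction position position_nemas (is_attacking direction position position_nemas)

-- ===== LEMMAS AND PROOFS =====

-- tag a color list with alternating hostile flags, as A's generator does
def pvTag (hd nv : Bool) : List String → List (String × Bool)
  | [] => []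
  | c :: cs => (c, hd == nv) :: pvTag hd (!nv) cs

theorem pvGen_eq_tag_ray (d : PySem.Dict (Int × Int) String) (dx dy : Int) (hd : Bool) :
    ∀ (f : Nat) (x y : Int) (nv : Bool),
      pvGen d x y dx dy hd nv f = pvTag hd nv (pvRay d x y dx dy f) := by
  intro f
  induction f with
  | zero => intro x y nv; simp [pvGen, pvRay, pvTag]
  | succ f ih =>
    intro x y nv
    simp only [pvGen, pvRay]
    cases d.get? (x, y) with
    | none => simp [pvTag]
    | some c => simp [pvTag, ih]

theorem pvMod2_flip (m : Int) :
    (PySem.Int.mod (m + 1) 2 == 1) = !(PySem.Int.mod m 2 == 1) := by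
  simp only [PySem.Int.mod, Int.fmod_eq_emod_of_nonneg _ (by norm_num : (0:Int) ≤ 2)]
  have h2 : m % 2 = 0 ∨ m % 2 = 1 := Int.emod_two_eq_zero_or_one m
  have h3 : (m + 1) % 2 = 1 - m % 2 := by omega
  rcases h2 with h | h <;> rw [h3, h] <;> decide

theorem pvPyMod2 (i : Int) : (PySem.Int.mod i 2 == 0) = decide (i % 2 = 0) := by
  simp only [PySem.Int.mod, Int.fmod_eq_emod_of_nonneg _ (by norm_num : (0:Int) ≤ 2)]
  by_cases h : i % 2 = 0 <;> simp [h]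

theorem pvConsume_eq_findDev (anchor defc : String) (hd : Bool) :
    ∀ (cs : List String) (i : Int) (nv : Bool), 2 ≤ i →
      ((hd == nv) = decide (i % 2 = 0)) →
      pvConsume anchor (some defc) i (pvTag hd nv cs) = pvFindDev anchor defc cs i := by
  intro cs
  induction cs with
  | nil => intro i nv _ _; simp [pvTag, pvConsume, pvFindDev]
  | cons c rest ih =>
    intro i nv hpos h
    have hine : ¬ i = 0 := by omega
    have hstep : ((hd == !nv) = decide ((i + 1) % 2 = 0)) := by
      cases hd <;> cases nv <;> simp_all <;> omega
    simp only [pvTag, pvConsume, pvFindDev]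
    by_cases hc : c = defc
    · subst hc
      by_cases hvi : (hd == nv) = true
      · simp [hine, hvi, ih (i + 1) (!nv) (by omega) hstep]
      · have hvb : (hd == nv) = false := by revert hvi; cases (hd == nv) <;> simp
        simp [hine, hvb, Option.isNone, ih (i + 1) (!nv) (by omega) hstep]
    · have hcb : (c == defc) = false := by simp [hc]
      by_cases hvi : (hd == nv) = true
      · have hie : decide (i % 2 = 0) = true := by rw [← h, hvi]
        have hdvd : (2 : Int) ∣ i := Int.dvd_of_emod_eq_zero (of_decide_eq_true hie)
        simp [hine, hvi, hcb, hdvd, Ne.symm hc]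
      · have hvb : (hd == nv) = false := by revert hvi; cases (hd == nv) <;> simp
        have hie : decide (i % 2 = 0) = false := by rw [← h, hvb]
        have hndvd : ¬ (2 : Int) ∣ i := fun hdv =>
          (of_decide_eq_false hie) (Int.emod_eq_zero_of_dvd hdv)
        simp [hine, hvb, hcb, hndvd, pvPyMod2, hie, Option.isNone, Ne.symm hc]

theorem pvDxy (dir : Int) :
    (PySem.Dict.mk [((0 : Int), ((0 : Int), (-1 : Int))), (1, (-1, 0)), (2, (0, 1))]).getD dir (1, 0)
      = (if dir = 0 then ((0 : Int), (-1 : Int)) else if dir = 1 then (-1, 0) else if dir = 2 then (0, 1) else (1, 0)) := by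
  rcases eq_or_ne dir 0 with h0 | h0
  · subst h0; simp [PySem.Dict.getD_eq_get?_getD, PySem.Dict.get?_mk_cons]
  rcases eq_or_ne dir 1 with h1 | h1
  · subst h1; simp [PySem.Dict.getD_eq_get?_getD, PySem.Dict.get?_mk_cons]
  rcases eq_or_ne dir 2 with h2 | h2
  · subst h2; simp [PySem.Dict.getD_eq_get?_getD, PySem.Dict.get?_mk_cons]
  · rw [PySem.Dict.getD_eq_get?_getD, PySem.Dict.get?_mk_cons, if_neg (by simp; omega),
      PySem.Dict.get?_mk_cons, if_neg (by simp; omega),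
      PySem.Dict.get?_mk_cons, if_neg (by simp; omega)]
    simp [PySem.Dict.get?, h0, h1, h2]

theorem pvBoolNeTrue {a b : Bool} (h : ¬ (a == b) = true) : (a == b) = false := by
  revert h; cases a <;> cases b <;> simp

theorem is_attacking_spec : Claim_equal_is_attacking := by
  intro direction position position_nemas _
  unfold Spec_is_attacking
  simp only [is_attacking, is_attacking_alt, pvDxy, pvGen_eq_tag_ray]
  cases hcs : pvRay (PySem.Dict.ofList (position_nemas.map (fun t => ((t.1, t.2.1), t.2.2))))
      position.1 position.2
      (if direction = 0 then ((0 : Int), (-1 : Int)) else if direction = 1 then (-1, 0) else if direction = 2 then (0, 1) else (1, 0)).1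
      (if direction = 0 then ((0 : Int), (-1 : Int)) else if direction = 1 then (-1, 0) else if direction = 2 then (0, 1) else (1, 0)).2
      (position_nemas.length + 1) with
  | nil => simp [pvTag, pvConsume]
  | cons c0 cs' =>
    cases cs' with
    | nil => simp [pvTag, pvConsume]
    | cons c1 rest =>
      simp only [pvTag, pvConsume]
      rw [pvMod2_flip (position.1 + position.2)]
      set hd := (PySem.Int.mod direction 2 == 1) with hhd
      set nv := (PySem.Int.mod (position.1 + position.2) 2 == 1) with hnv
      by_cases h1 : (hd == !nv) = true
      · simp [h1]
      · have h1f : (hd == !nv) = false := pvBoolNeTrue h1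
        have hdnv : hd = nv := by revert h1f; cases hd <;> cases nv <;> simp
        have hmain := pvConsume_eq_findDev c0 c1 hd rest 2 nv (by omega)
          (by rw [hdnv]; cases nv <;> decide)
        simp only [Bool.not_not, hdnv] at *
        simp [Option.isNone, hmain]
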